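-- pv_equiv track=rewrite | github.com/paulklemstine/factor | lean/demo/Cryptography/Factoring/IOF/demos/iof_orbit_demo.py | is_b_smooth
-- ===== SOURCE A (Python) =====
-- def is_b_smooth(n, B):
--     """Check if n is B-smooth (all prime factors ≤ B)."""
--     if n <= 1:
--         return True, {}
--     factors = {}
--     temp = n
--     for p in range(2, B + 1):
--         while temp % p == 0:
--             factors[p] = factors.get(p, 0) + 1
--             temp //= p
--     return temp == 1, factors
-- ===== SOURCE B (Python) =====
-- def is_b_smooth(n, B):
--     """Check if n is B-smooth (all prime factors <= B)."""
--     if n <= 1: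
--         return True, {}
--     factors = {}
--     temp = n
--     if B >= 2:
--         e = 0
--         while temp % 2 == 0:
--             temp //= 2
--             e += 1
--         if e:
--             factors[2] = e
--         p = 3
--         while p <= B and p * p <= temp:
--             e = 0
--             while temp % p == 0:
--                 temp //= p
--                 e += 1
--             if e:
--                 factors[p] = e
--             p += 2
--     if 1 < temp <= B:
--         factors[temp] = 1
--         temp = 1
--     return temp == 1, factors
-- ===== Notes on version B (the rewrite author's own statement) =====
-- stated objective: faster
-- what changed: B replaces A's scan of every candidate divisor 2..B by early-exiting trial division: strip 2, then only odd p while p <= B and p*p <= temp, and treat any leftover 1 < temp <= B as a prime factor with exponent 1.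
import Mathlib
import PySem

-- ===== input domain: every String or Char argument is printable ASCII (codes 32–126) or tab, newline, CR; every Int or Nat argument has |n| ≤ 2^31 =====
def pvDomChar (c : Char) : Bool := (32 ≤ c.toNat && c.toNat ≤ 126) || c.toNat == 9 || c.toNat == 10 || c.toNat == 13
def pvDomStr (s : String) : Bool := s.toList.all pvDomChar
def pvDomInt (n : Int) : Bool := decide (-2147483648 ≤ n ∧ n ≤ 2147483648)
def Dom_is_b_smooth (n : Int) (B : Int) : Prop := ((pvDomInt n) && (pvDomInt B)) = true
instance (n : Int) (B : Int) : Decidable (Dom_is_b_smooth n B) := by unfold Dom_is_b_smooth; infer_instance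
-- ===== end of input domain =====

-- B replaces A's scan of every candidate 2..B by early-exiting trial division (2, then odd p while p*p ≤ temp,
-- leftover treated as a prime): an alternative algorithm bounded by √n instead of B.

-- ===== PORT A =====
-- inner 'while temp % p == 0' loop of A; fuel bounds the divisions (temp.natAbs suffices for 0 < temp, p ≥ 2)
def pvStripA (p : Int) : Nat → Int × PySem.Dict Int Int → Int × PySem.Dict Int Int
  | 0, st => st
  | f + 1, (temp, d) =>
    if PySem.Int.mod temp p = 0 then
      pvStripA p f (PySem.Int.floordiv temp p, d.insert p (d.getD p 0 + 1))
    else (temp, d)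

def is_b_smooth (n : Int) (B : Int) : Bool × (List (Int × Int)) :=
  if n ≤ 1 then (true, [])
  else
    let st := (PySem.List.pyRange 2 (B + 1) 1).foldl
      (fun (st : Int × PySem.Dict Int Int) p => pvStripA p st.1.natAbs st)
      (n, PySem.Dict.empty)
    (st.1 == 1, st.2.items)

-- ===== PORT B =====
-- inner 'while temp % p == 0' loop of B, counting the exponent (fuel as above)
def pvStripB (p : Int) : Nat → Int × Int → Int × Int
  | 0, st => st
  | f + 1, (temp, e) =>
    if PySem.Int.mod temp p = 0 then
      pvStripB p f (PySem.Int.floordiv temp p, e + 1)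
    else (temp, e)

-- 'while p <= B and p * p <= temp' loop of B over odd p (fuel B.natAbs suffices)
def pvOddLoop (B : Int) : Nat → Int → Int × PySem.Dict Int Int → Int × PySem.Dict Int Int
  | 0, _, st => st
  | f + 1, p, (temp, d) =>
    if p ≤ B ∧ p * p ≤ temp then
      let r := pvStripB p temp.natAbs (temp, 0)
      pvOddLoop B f (p + 2) (r.1, if r.2 ≠ 0 then d.insert p r.2 else d)
    else (temp, d)

def is_b_smooth_alt (n : Int) (B : Int) : Bool × (List (Int × Int)) :=
  if n ≤ 1 then (true, [])
  else
    let st :=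
      if 2 ≤ B then
        let r := pvStripB 2 n.natAbs (n, 0)
        pvOddLoop B B.natAbs 3
          (r.1, if r.2 ≠ 0 then PySem.Dict.empty.insert 2 r.2 else PySem.Dict.empty)
      else (n, PySem.Dict.empty)
    if 1 < st.1 ∧ st.1 ≤ B then (true, (st.2.insert st.1 1).items)
    else (st.1 == 1, st.2.items)

-- ===== PRECONDITION & SPEC =====
def Spec_is_b_smooth (n : Int) (B : Int) (out : Bool × (List (Int × Int))) : Prop := out = is_b_smooth_alt n B
instance (n : Int) (B : Int) (out : Bool × (List (Int × Int))) : Decidable (Spec_is_b_smooth n B out) := by unfold Spec_is_b_smooth; infer_instance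

-- ===== CLAIM (what is proved, stated in full; the proofs are below) =====
def Claim_equal_is_b_smooth : Prop := ∀ (n : Int) (B : Int), Dom_is_b_smooth n B → Spec_is_b_smooth n B (is_b_smooth n B)

-- ===== LEMMAS AND PROOFS =====

-- A's fold over range(2, B+1), written as recursion on p for the proofs
def pvAFold (B p : Int) (st : Int × PySem.Dict Int Int) : Int × PySem.Dict Int Int :=
  if h : p ≤ B then pvAFold B (p + 1) (pvStripA p st.1.natAbs st) else st
termination_by (B + 1 - p).toNat
decreasing_by omega

theorem pvAFold_eq_foldl (B p : Int) (st : Int × PySem.Dict Int Int) :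
    (PySem.List.pyRange p (B + 1) 1).foldl
      (fun (st : Int × PySem.Dict Int Int) q => pvStripA q st.1.natAbs st) st = pvAFold B p st := by
  by_cases h : p ≤ B
  · rw [PySem.List.pyRange_one_cons (by omega : p < B + 1), List.foldl_cons]
    conv_rhs => rw [pvAFold]
    rw [dif_pos h]
    exact pvAFold_eq_foldl B (p + 1) _
  · rw [PySem.List.pyRange_one_eq_nil (by omega : B + 1 ≤ p), List.foldl_nil]
    conv_rhs => rw [pvAFold]
    rw [dif_neg h]
termination_by (B + 1 - p).toNat
decreasing_by omega

theorem stripB_shift (p : Int) : ∀ (f : Nat) (t a : Int),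
    pvStripB p f (t, a) = ((pvStripB p f (t, 0)).1, a + (pvStripB p f (t, 0)).2) := by
  intro f
  induction f with
  | zero => intro t a; simp [pvStripB]
  | succ f ih =>
    intro t a
    simp only [pvStripB]
    split
    · rw [ih (PySem.Int.floordiv t p) (a + 1), ih (PySem.Int.floordiv t p) (0 + 1)]
      simp; ring
    · simp

theorem stripB_nonneg (p : Int) (f : Nat) (t : Int) : 0 ≤ (pvStripB p f (t, 0)).2 := by
  induction f generalizing t with
  | zero => simp [pvStripB]
  | succ f ih =>
    simp only [pvStripB]
    split
    · rw [stripB_shift]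
      have := ih (PySem.Int.floordiv t p)
      omega
    · simp

-- A's inner loop equals B's inner loop plus one dict insertion
theorem strip_corr (p : Int) : ∀ (f : Nat) (temp : Int) (d : PySem.Dict Int Int),
    pvStripA p f (temp, d) =
      ((pvStripB p f (temp, 0)).1,
       if (pvStripB p f (temp, 0)).2 ≠ 0 then
         d.insert p (d.getD p 0 + (pvStripB p f (temp, 0)).2) else d) := by
  intro f
  induction f with
  | zero => intro temp d; simp [pvStripA, pvStripB]
  | succ f ih =>
    intro temp d
    simp only [pvStripA, pvStripB]
    split
    · rw [ih]
      rw [stripB_shift p f (PySem.Int.floordiv temp p) (0 + 1)]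
      have hnn := stripB_nonneg p f (PySem.Int.floordiv temp p)
      set r := pvStripB p f (PySem.Int.floordiv temp p, 0)
      by_cases hz : r.2 = 0
      · simp [hz]
      · have h1 : ¬ ((0:Int) + 1 + r.2 = 0) := by omega
        simp only [hz, h1, ne_eq, not_false_iff, if_true,
          PySem.Dict.getD_insert_self, PySem.Dict.insert_insert_self, Prod.mk.injEq]
        refine ⟨trivial, ?_⟩
        congr 1
        ring
    · simp

theorem stripB_spec (p : Int) (hp : 2 ≤ p) : ∀ (f : Nat) (temp : Int),
    0 < temp → temp.natAbs ≤ f →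
    0 < (pvStripB p f (temp, 0)).1 ∧ (pvStripB p f (temp, 0)).1 ∣ temp ∧
      ¬ p ∣ (pvStripB p f (temp, 0)).1 := by
  intro f
  induction f with
  | zero => intro temp h0 hf; omega
  | succ f ih =>
    intro temp h0 hf
    simp only [pvStripB]
    by_cases hd : PySem.Int.mod temp p = 0
    · rw [if_pos hd]
      have hdvd : p ∣ temp := (PySem.Int.mod_eq_zero_iff_dvd temp p).1 hd
      have hfd : PySem.Int.floordiv temp p = temp / p :=
        PySem.Int.floordiv_eq_ediv_of_pos (by omega)
      have hmul : temp / p * p = temp := Int.ediv_mul_cancel hdvd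
      have hq0 : 0 < temp / p := by nlinarith [hmul]
      have hqtemp : temp / p < temp := by nlinarith [hmul, hq0]
      have hqd : temp / p ∣ temp := ⟨p, by linarith [hmul]⟩
      rw [hfd, stripB_shift p f (temp / p) (0 + 1)]
      have := ih (temp / p) hq0 (by omega)
      exact ⟨this.1, dvd_trans this.2.1 hqd, this.2.2⟩
    · rw [if_neg hd]
      refine ⟨h0, dvd_rfl, ?_⟩
      intro hc
      exact hd ((PySem.Int.mod_eq_zero_iff_dvd temp p).2 hc)

theorem stripB_one (p : Int) (hp : 2 ≤ p) (f : Nat) (a : Int) :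
    pvStripB p f (1, a) = (1, a) := by
  cases f with
  | zero => rfl
  | succ f =>
    simp only [pvStripB]
    rw [if_neg]
    rw [PySem.Int.mod_eq_emod_of_pos (by omega : (0:Int) < p),
      Int.emod_eq_of_lt (by omega) (by omega)]
    omega

theorem stripB_self (temp : Int) (h2 : 2 ≤ temp) (f : Nat) (hf : 2 ≤ f) :
    pvStripB temp f (temp, 0) = (1, 1) := by
  cases f with
  | zero => omega
  | succ f =>
    simp only [pvStripB]
    rw [if_pos ((PySem.Int.mod_eq_zero_iff_dvd temp temp).2 dvd_rfl)]
    rw [PySem.Int.floordiv_eq_ediv_of_pos (by omega : (0:Int) < temp),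
      Int.ediv_self (by omega : temp ≠ 0)]
    rw [stripB_one temp h2 f (0 + 1)]
    norm_num

theorem stripA_skip (p temp : Int) (d : PySem.Dict Int Int) (h : ¬ p ∣ temp) (f : Nat) :
    pvStripA p f (temp, d) = (temp, d) := by
  cases f with
  | zero => rfl
  | succ f =>
    simp only [pvStripA]
    rw [if_neg]
    rw [PySem.Int.mod_eq_zero_iff_dvd]
    exact h

theorem afold_skip (B p : Int) (st : Int × PySem.Dict Int Int) (h : ¬ p ∣ st.1) :
    pvAFold B p st = pvAFold B (p + 1) st := by
  obtain ⟨t, d⟩ := st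
  conv_lhs => rw [pvAFold]
  by_cases hpB : p ≤ B
  · rw [dif_pos hpB]
    rw [stripA_skip p t d h]
  · rw [dif_neg hpB]
    conv_rhs => rw [pvAFold]
    rw [dif_neg (by omega : ¬ p + 1 ≤ B)]

theorem afold_one (B p : Int) (d : PySem.Dict Int Int) (hp : 2 ≤ p) :
    pvAFold B p (1, d) = (1, d) := by
  conv_lhs => rw [pvAFold]
  by_cases hpB : p ≤ B
  · rw [dif_pos hpB]
    rw [stripA_skip p 1 d (fun hdvd => by have := Int.le_of_dvd one_pos hdvd; omega)]
    exact afold_one B (p + 1) d (by omega)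
  · rw [dif_neg hpB]
termination_by (B + 1 - p).toNat
decreasing_by omega

-- a key all of d's keys are below is not yet in d
theorem not_contains_of_keys_lt (d : PySem.Dict Int Int) (p : Int)
    (hk : ∀ k ∈ d.keys, k < p) : d.contains p = false := by
  by_contra h
  have : d.contains p = true := by
    cases hc : d.contains p
    · exact absurd hc h
    · rfl
  have := (PySem.Dict.contains_iff_mem_keys d p).1 this
  have := hk p this
  omega

-- when temp has no divisor in [2, temp) and no candidate below p is left, A strips temp itself iff temp ≤ B
theorem afold_last (B p temp : Int) (d : PySem.Dict Int Int) (hp : 2 ≤ p) (hpt : p ≤ temp)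
    (hdiv : ∀ q, 2 ≤ q → q < temp → ¬ q ∣ temp) (hkeys : ∀ k ∈ d.keys, k < p) :
    pvAFold B p (temp, d) = if temp ≤ B then (1, d.insert temp 1) else (temp, d) := by
  by_cases hpB : p ≤ B
  · by_cases hlt : p < temp
    · rw [afold_skip B p (temp, d) (hdiv p hp hlt)]
      exact afold_last B (p + 1) temp d (by omega) (by omega) hdiv
        (fun k hk => by have := hkeys k hk; omega)
    · have hpe : p = temp := by omega
      subst hpe
      conv_lhs => rw [pvAFold]
      rw [dif_pos hpB]
      have hst : pvStripA p (p, d).1.natAbs (p, d) = (1, d.insert p 1) := by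
        show pvStripA p p.natAbs (p, d) = (1, d.insert p 1)
        rw [strip_corr p p.natAbs p d,
          stripB_self p (by omega) p.natAbs (by omega)]
        rw [PySem.Dict.getD_of_not_contains d 0 (not_contains_of_keys_lt d p hkeys)]
        norm_num
      rw [hst, afold_one B (p + 1) (d.insert p 1) (by omega), if_pos hpB]
  · conv_lhs => rw [pvAFold]
    rw [dif_neg hpB, if_neg (by omega : ¬ temp ≤ B)]
termination_by (temp - p).toNat
decreasing_by omega

-- main simulation: A's remaining fold equals B's odd loop followed by the leftover-prime fix-up
theorem pvMain (B : Int) (fuel : Nat) (p temp : Int) (d : PySem.Dict Int Int)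
    (hp : 3 ≤ p) (hodd : p % 2 = 1) (h0 : 0 < temp)
    (hdiv : ∀ q, 2 ≤ q → q < p → ¬ q ∣ temp) (hkeys : ∀ k ∈ d.keys, k < p)
    (hfuel : B < p + 2 * fuel) :
    pvAFold B p (temp, d) =
      (let st := pvOddLoop B fuel p (temp, d);
       if 1 < st.1 ∧ st.1 ≤ B then (1, st.2.insert st.1 1) else st) := by
  have hge : 1 < temp → p ≤ temp := by
    intro h1
    by_contra hc
    exact hdiv temp (by omega) (by omega) dvd_rfl
  cases fuel with
  | zero =>
    simp only [pvOddLoop]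
    conv_lhs => rw [pvAFold]
    rw [dif_neg (by omega : ¬ p ≤ B)]
    rw [if_neg (by intro hx; have := hge hx.1; omega)]
  | succ f =>
    simp only [pvOddLoop]
    by_cases hc : p ≤ B ∧ p * p ≤ temp
    · rw [if_pos hc]
      have spec := stripB_spec p (by omega) temp.natAbs temp h0 (le_refl _)
      set r := pvStripB p temp.natAbs (temp, 0) with hr
      have hcont := not_contains_of_keys_lt d p hkeys
      have hnd2 : ¬ (2:Int) ∣ temp := hdiv 2 (by omega) (by omega)
      conv_lhs => rw [pvAFold]
      rw [dif_pos hc.1]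
      have hst : pvStripA p (temp, d).1.natAbs (temp, d) =
          (r.1, if r.2 ≠ 0 then d.insert p r.2 else d) := by
        show pvStripA p temp.natAbs (temp, d) = _
        rw [strip_corr p temp.natAbs temp d, ← hr,
          PySem.Dict.getD_of_not_contains d 0 hcont]
        norm_num
      rw [hst]
      have hskip : ¬ (p + 1) ∣ r.1 := by
        intro hdvd
        have h2q : (2:Int) ∣ (p + 1) := by omega
        exact hnd2 ((h2q.trans hdvd).trans spec.2.1)
      rw [afold_skip B (p + 1) _ hskip]
      have hdiv' : ∀ q, 2 ≤ q → q < p + 2 → ¬ q ∣ r.1 := by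
        intro q hq2 hqlt hqdvd
        have htri : q < p ∨ q = p ∨ q = p + 1 := by omega
        rcases htri with h | h | h
        · exact hdiv q hq2 h (hqdvd.trans spec.2.1)
        · exact spec.2.2 (h ▸ hqdvd)
        · have h2q : (2:Int) ∣ q := by omega
          exact hnd2 ((h2q.trans hqdvd).trans spec.2.1)
      have hkeys' : ∀ k ∈ (if r.2 ≠ 0 then d.insert p r.2 else d).keys, k < p + 2 := by
        intro k hk
        split_ifs at hk with hz
        · rw [PySem.Dict.keys_insert_of_not_contains d r.2 hcont] at hk
          rcases List.mem_append.1 hk with hk | hk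
          · have := hkeys k hk; omega
          · simp at hk; omega
        · have := hkeys k hk; omega
      rw [show p + 1 + 1 = p + 2 by ring]
      simpa using pvMain B f (p + 2) r.1 _ (by omega) (by omega) spec.1 hdiv' hkeys' (by omega)
    · rw [if_neg hc]
      by_cases hpB : p ≤ B
      · have hsq : temp < p * p := by
          rcases not_and_or.1 hc with h | h
          · exact absurd hpB h
          · exact lt_of_not_ge h
        by_cases h1 : temp = 1
        · subst h1
          rw [afold_one B p d (by omega)]
          rw [if_neg (by omega)]
        · have h2t : 2 ≤ temp := by omega
          have hprime : ∀ q, 2 ≤ q → q < temp → ¬ q ∣ temp := by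
            intro q hq2 hqt hdq
            obtain ⟨c, hc'⟩ := hdq
            have hc0 : 0 < c := by nlinarith
            have hc2 : 2 ≤ c := by
              by_contra hx
              have hc1 : c = 1 := by omega
              rw [hc1, mul_one] at hc'
              omega
            have hcd : c ∣ temp := ⟨q, by linarith [mul_comm q c]⟩
            have hqp : p ≤ q := by
              by_contra hx
              exact hdiv q hq2 (by omega) ⟨c, hc'⟩
            have hcp : p ≤ c := by
              by_contra hx
              exact hdiv c hc2 (by omega) hcd
            nlinarith
          rw [afold_last B p temp d (by omega) (hge (by omega)) hprime hkeys]
          by_cases htB : temp ≤ B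
          · rw [if_pos htB, if_pos (by omega : 1 < temp ∧ temp ≤ B)]
          · rw [if_neg htB, if_neg (by omega : ¬ (1 < temp ∧ temp ≤ B))]
      · conv_lhs => rw [pvAFold]
        rw [dif_neg hpB]
        rw [if_neg (by intro hx; have := hge hx.1; omega)]
termination_by fuel

-- ===== VERDICT (by name: the statement is the Claim_ definition above) =====
theorem is_b_smooth_spec : Claim_equal_is_b_smooth := by
  intro n B _hdom
  unfold Spec_is_b_smooth is_b_smooth is_b_smooth_alt
  by_cases hn : n ≤ 1
  · simp only [if_pos hn]
  · simp only [if_neg hn]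
    rw [pvAFold_eq_foldl B 2 (n, PySem.Dict.empty)]
    by_cases hB : 2 ≤ B
    · conv_lhs => rw [pvAFold]
      rw [dif_pos hB]
      have spec := stripB_spec 2 (le_refl 2) n.natAbs n (by omega) (le_refl _)
      set r := pvStripB 2 n.natAbs (n, 0) with hr
      have hst : pvStripA 2 (n, (PySem.Dict.empty : PySem.Dict Int Int)).1.natAbs
            (n, PySem.Dict.empty) =
          (r.1, if r.2 ≠ 0 then PySem.Dict.empty.insert 2 r.2 else PySem.Dict.empty) := by
        show pvStripA 2 n.natAbs (n, PySem.Dict.empty) = _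
        rw [strip_corr 2 n.natAbs n PySem.Dict.empty, ← hr, PySem.Dict.getD_empty]
        norm_num
      rw [hst]
      have hkeys : ∀ k ∈ (if r.2 ≠ 0 then (PySem.Dict.empty : PySem.Dict Int Int).insert 2 r.2
          else PySem.Dict.empty).keys, k < 3 := by
        intro k hk
        split_ifs at hk with hz
        · rw [PySem.Dict.keys_insert_of_not_contains _ r.2 (PySem.Dict.contains_empty 2)] at hk
          rw [PySem.Dict.keys_empty] at hk
          simp at hk
          omega
        · rw [PySem.Dict.keys_empty] at hk
          simp at hk
      have hdiv : ∀ q, 2 ≤ q → q < 3 → ¬ q ∣ r.1 := by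
        intro q hq2 hq3
        have hq : q = 2 := by omega
        subst hq
        exact spec.2.2
      have hmain := pvMain B B.natAbs 3 r.1 _ (le_refl 3) (by decide) spec.1 hdiv hkeys
        (by omega)
      rw [show (2:Int) + 1 = 3 from rfl, hmain, if_pos hB]
      set st := pvOddLoop B B.natAbs 3
        (r.1, if r.2 ≠ 0 then (PySem.Dict.empty : PySem.Dict Int Int).insert 2 r.2
          else PySem.Dict.empty) with hstdef
      by_cases hfin : 1 < st.1 ∧ st.1 ≤ B
      · rw [if_pos hfin, if_pos hfin]
        simp
      · rw [if_neg hfin, if_neg hfin]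
    · conv_lhs => rw [pvAFold]
      rw [dif_neg hB, if_neg hB]
      rw [if_neg (by simp; omega : ¬ (1 < (n, (PySem.Dict.empty : PySem.Dict Int Int)).1 ∧
        (n, (PySem.Dict.empty : PySem.Dict Int Int)).1 ≤ B))]
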